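-- pv_equiv track=rewrite | github.com/nikitachunikhin/Python_train_project | my_codewars_functions/lists/days_ represented_in_foreign_country.py | days_represented
-- ===== SOURCE A (Python) =====
-- def remove_duplicates_from_list(input_list):
--     list_no_duplicates = []
--     for elem in input_list:
--         if elem not in list_no_duplicates:
--             list_no_duplicates.append(elem)
--     return list_no_duplicates
--
-- def days_represented(trips):
--     """
--     How many days are we represented in a foreign country?
--
--     My colleagues make business trips to a foreign country. We must find the number of days our company is
--     represented in a country. Every day that one or more colleagues are present in the country is a day that the
--     company is represented. A single day cannot count for more than one day. Write a function that recieves a list of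
--     pairs and returns the number of days that the company is represented in the foreign country. The first number of
--     the pair is the number of the day of arrival and the second number of the pair is the day of departure of someone
--     who travels, i.e. 1 january is number 1 and 31 of december is 365.
--
--     :param trips: list of lists wit 2 elements, for example: [[10,15],[25,35],[25,35]]
--     :return: integer
--
--     """
--     trips = remove_duplicates_from_list(trips)  # remove duplicates from list
--
--     days = []
--     for trip in trips:
--         if trip[0] < trip[1]:  # exclude trip it end earlier than begin
--             new_list = [i for i in range(trip[0], trip[1]+1)]
--             days = days + new_list
--
--     days = list(set(days))  # unique days only
--     result = len(days)
--     return result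
-- ===== SOURCE B (Python) =====
-- def days_represented(trips):
--     # Same count of distinct covered days, computed by sort-and-merge over the
--     # intervals instead of materialising every day; O(n log n).
--     ivs = sorted(((t[0], t[1]) for t in trips if t[0] < t[1]), key=lambda p: p[0])
--     total = 0
--     cur = None
--     for s, e in ivs:
--         if cur is None:
--             cur = (s, e)
--         elif s > cur[1] + 1:
--             total += cur[1] - cur[0] + 1
--             cur = (s, e)
--         elif e > cur[1]:
--             cur = (cur[0], e)
--     if cur is not None:
--         total += cur[1] - cur[0] + 1
--     return total
-- ===== Notes on version B (the rewrite author's own statement) =====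
-- stated objective: faster
-- what changed: Replaces dedup-trips + materialising every day of every interval in a list and deduplicating it with filter-sort-merge over the intervals, summing merged interval lengths.
import Mathlib
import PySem

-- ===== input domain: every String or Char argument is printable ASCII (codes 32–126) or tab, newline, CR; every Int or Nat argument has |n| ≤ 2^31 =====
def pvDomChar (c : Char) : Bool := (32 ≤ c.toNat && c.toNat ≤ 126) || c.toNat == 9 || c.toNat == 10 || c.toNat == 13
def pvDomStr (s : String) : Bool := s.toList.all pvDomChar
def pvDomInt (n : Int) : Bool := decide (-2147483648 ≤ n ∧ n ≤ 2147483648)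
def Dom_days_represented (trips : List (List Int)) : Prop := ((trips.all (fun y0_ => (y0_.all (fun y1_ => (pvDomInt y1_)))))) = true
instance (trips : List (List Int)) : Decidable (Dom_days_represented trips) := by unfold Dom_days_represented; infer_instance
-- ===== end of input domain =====

-- B replaces A's "materialise every covered day, then deduplicate" with filter-sort-merge
-- over the intervals, summing merged interval lengths (measured asymptotically faster).


-- ===== PORT A =====
def removeDuplicatesFromList (input_list : List (List Int)) : List (List Int) :=
  input_list.foldl (fun acc elem => if elem ∈ acc then acc else acc ++ [elem]) []

def days_represented (trips : List (List Int)) : Int :=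
  let trips' := removeDuplicatesFromList trips
  let days := trips'.foldl (fun days trip =>
    if PySem.List.pyGetD trip 0 0 < PySem.List.pyGetD trip 1 0 then
      days ++ PySem.List.pyRange (PySem.List.pyGetD trip 0 0) (PySem.List.pyGetD trip 1 0 + 1) 1
    else days) []
  PySem.Set.len (PySem.Set.ofList days)

-- ===== PORT B =====
def mergeStep (st : Option (Int × Int) × Int) (p : Int × Int) : Option (Int × Int) × Int :=
  match st with
  | (none, total) => (some p, total)
  | (some (cs, ce), total) =>
    if ce + 1 < p.1 then (some p, total + (ce - cs + 1))
    else if ce < p.2 then (some (cs, p.2), total)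
    else (some (cs, ce), total)

def days_represented_alt (trips : List (List Int)) : Int :=
  let ivs := PySem.List.sorted
    ((trips.filter (fun t => PySem.List.pyGetD t 0 0 < PySem.List.pyGetD t 1 0)).map
      (fun t => (PySem.List.pyGetD t 0 0, PySem.List.pyGetD t 1 0)))
    (fun p => p.1) false
  let st := ivs.foldl mergeStep (none, 0)
  match st with
  | (none, total) => total
  | (some (cs, ce), total) => total + (ce - cs + 1)

-- ===== PRECONDITION & SPEC =====
-- A (and B) index trip[0] and trip[1]: a trip of length < 2 raises IndexError in both.
def Pre_days_represented (trips : List (List Int)) : Prop :=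
  ∀ t ∈ trips, 2 ≤ t.length
instance (trips : List (List Int)) : Decidable (Pre_days_represented trips) := by
  unfold Pre_days_represented; infer_instance
def pvWitness_days_represented : List (List Int) := [[10, 15], [25, 35], [25, 35]]

def Spec_days_represented (trips : List (List Int)) (out : Int) : Prop := out = days_represented_alt trips
instance (trips : List (List Int)) (out : Int) : Decidable (Spec_days_represented trips out) := by unfold Spec_days_represented; infer_instance

-- ===== CLAIM (what is proved, stated in full; the proofs are below) =====
def Claim_equal_days_represented : Prop := ∀ (trips : List (List Int)), Dom_days_represented trips → Pre_days_represented trips → Spec_days_represented trips (days_represented trips)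

-- ===== LEMMAS AND PROOFS =====

-- the set of days covered by a list of (start, end) pairs (proof-only helper)
noncomputable def cover (l : List (Int × Int)) : Finset Int :=
  l.foldr (fun p acc => Finset.Icc p.1 p.2 ∪ acc) ∅

theorem mem_cover (l : List (Int × Int)) (x : Int) :
    x ∈ cover l ↔ ∃ p ∈ l, p.1 ≤ x ∧ x ≤ p.2 := by
  induction l with
  | nil => simp [cover]
  | cons p t ih =>
    simp only [cover, List.foldr_cons] at *
    constructor
    · intro hx
      rcases Finset.mem_union.1 hx with hx | hx
      · exact ⟨p, by simp, by simpa [Finset.mem_Icc] using hx⟩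
      · obtain ⟨q, hq, hq2⟩ := ih.1 hx
        exact ⟨q, by simp [hq], hq2⟩
    · rintro ⟨q, hq, hq2⟩
      rcases List.mem_cons.1 hq with rfl | hq
      · exact Finset.mem_union_left _ (by rw [Finset.mem_Icc]; exact hq2)
      · exact Finset.mem_union_right _ (ih.2 ⟨q, hq, hq2⟩)

-- the valid (start, end) pairs of the input, in order
def pairsOf (trips : List (List Int)) : List (Int × Int) :=
  (trips.filter (fun t => PySem.List.pyGetD t 0 0 < PySem.List.pyGetD t 1 0)).map
    (fun t => (PySem.List.pyGetD t 0 0, PySem.List.pyGetD t 1 0))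

theorem mem_removeDup_aux (l : List (List Int)) (acc : List (List Int)) (x : List Int) :
    x ∈ l.foldl (fun acc elem => if elem ∈ acc then acc else acc ++ [elem]) acc ↔
      x ∈ acc ∨ x ∈ l := by
  induction l generalizing acc with
  | nil => simp
  | cons e t ih =>
    simp only [List.foldl_cons]
    by_cases h : e ∈ acc
    · rw [if_pos h, ih]
      constructor
      · rintro (hx | hx)
        · exact Or.inl hx
        · exact Or.inr (List.mem_cons_of_mem _ hx)
      · rintro (hx | hx)
        · exact Or.inl hx
        · rcases List.mem_cons.1 hx with rfl | hx
          · exact Or.inl h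
          · exact Or.inr hx
    · rw [if_neg h, ih]
      constructor
      · rintro (hx | hx)
        · rcases List.mem_append.1 hx with hx | hx
          · exact Or.inl hx
          · simp only [List.mem_singleton] at hx
            exact Or.inr (by simp [hx])
        · exact Or.inr (List.mem_cons_of_mem _ hx)
      · rintro (hx | hx)
        · exact Or.inl (List.mem_append.2 (Or.inl hx))
        · rcases List.mem_cons.1 hx with rfl | hx
          · exact Or.inl (List.mem_append.2 (Or.inr (by simp)))
          · exact Or.inr hx

theorem foldA_eq (l : List (List Int)) (acc : List Int) :
    l.foldl (fun days trip =>
      if PySem.List.pyGetD trip 0 0 < PySem.List.pyGetD trip 1 0 then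
        days ++ PySem.List.pyRange (PySem.List.pyGetD trip 0 0) (PySem.List.pyGetD trip 1 0 + 1) 1
      else days) acc =
    acc ++ l.flatMap (fun trip =>
      if PySem.List.pyGetD trip 0 0 < PySem.List.pyGetD trip 1 0 then
        PySem.List.pyRange (PySem.List.pyGetD trip 0 0) (PySem.List.pyGetD trip 1 0 + 1) 1
      else []) := by
  induction l generalizing acc with
  | nil => simp
  | cons e t ih => simp only [List.foldl_cons, List.flatMap_cons, ih]; split <;> simp

theorem daysA_mem (trips : List (List Int)) (x : Int) :
    x ∈ (removeDuplicatesFromList trips).foldl (fun days trip =>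
      if PySem.List.pyGetD trip 0 0 < PySem.List.pyGetD trip 1 0 then
        days ++ PySem.List.pyRange (PySem.List.pyGetD trip 0 0) (PySem.List.pyGetD trip 1 0 + 1) 1
      else days) [] ↔ x ∈ cover (pairsOf trips) := by
  rw [foldA_eq, mem_cover]
  simp only [List.nil_append, List.mem_flatMap, pairsOf, List.mem_map, List.mem_filter]
  constructor
  · rintro ⟨t, ht, hx⟩
    rw [removeDuplicatesFromList, mem_removeDup_aux] at ht
    simp only [List.not_mem_nil, false_or] at ht
    by_cases hc : PySem.List.pyGetD t 0 0 < PySem.List.pyGetD t 1 0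
    · rw [if_pos hc, PySem.List.mem_pyRange_one] at hx
      exact ⟨_, ⟨t, ⟨ht, by simp [hc]⟩, rfl⟩, hx.1, by omega⟩
    · rw [if_neg hc] at hx; simp at hx
  · rintro ⟨p, ⟨t, ⟨ht, hc⟩, rfl⟩, h1, h2⟩
    simp only [decide_eq_true_eq] at hc
    refine ⟨t, ?_, ?_⟩
    · rw [removeDuplicatesFromList, mem_removeDup_aux]; simp [ht]
    · rw [if_pos hc, PySem.List.mem_pyRange_one]; omega

theorem len_ofList_eq_card (dl : List Int) (S : Finset Int) (h : ∀ x, x ∈ dl ↔ x ∈ S) :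
    PySem.Set.len (PySem.Set.ofList dl) = (S.card : Int) := by
  have h1 : ((PySem.Set.ofList dl : List Int)).toFinset = S :=
    Finset.ext fun x => by rw [List.mem_toFinset, PySem.Set.mem_ofList, h]
  have h2 : ((PySem.Set.ofList dl : List Int)).toFinset.card =
      (PySem.Set.ofList dl : List Int).length :=
    List.toFinset_card_of_nodup (PySem.Set.nodup_ofList _)
  simp only [PySem.Set.len, ← h1, h2]

theorem sideA (trips : List (List Int)) :
    days_represented trips = ((cover (pairsOf trips)).card : Int) := by
  show PySem.Set.len (PySem.Set.ofList _) = _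
  exact len_ofList_eq_card _ _ (daysA_mem trips)

-- merge invariant: closing out the final pending interval yields the covered-day count
theorem card_union_Icc (C : Finset Int) (cs ce total : Int)
    (hdisj : Disjoint C (Finset.Icc cs ce)) (hcs : cs ≤ ce) (htot : total = (C.card : Int)) :
    total + (ce - cs + 1) = (((C ∪ Finset.Icc cs ce).card : Nat) : Int) := by
  rw [Finset.card_union_of_disjoint hdisj, Nat.cast_add, Int.card_Icc,
    Int.toNat_of_nonneg (by omega)]
  omega

theorem merge_go (l : List (Int × Int)) (cs ce total : Int) (C : Finset Int)
    (hpair : l.Pairwise (fun a b => a.1 ≤ b.1))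
    (hge : ∀ p ∈ l, cs ≤ p.1)
    (hval : ∀ p ∈ l, p.1 < p.2)
    (hcs : cs ≤ ce)
    (hC : ∀ x ∈ C, x < cs - 1)
    (htot : total = (C.card : Int)) :
    (match l.foldl mergeStep (some (cs, ce), total) with
      | (none, s) => s
      | (some (a, b), s) => s + (b - a + 1)) =
    ((C ∪ Finset.Icc cs ce ∪ cover l).card : Int) := by
  induction l generalizing cs ce total C with
  | nil =>
    simp only [List.foldl_nil, cover, List.foldr_nil, Finset.union_empty]
    exact card_union_Icc C cs ce total
      (by rw [Finset.disjoint_left]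
          intro x hx hx'
          rw [Finset.mem_Icc] at hx'
          have := hC x hx; omega) hcs htot
  | cons p t ih =>
    obtain ⟨s, e⟩ := p
    have hcs_s : cs ≤ s := hge _ (List.mem_cons_self ..)
    have hse : s < e := hval _ (List.mem_cons_self ..)
    have hcov : cover ((s, e) :: t) = Finset.Icc s e ∪ cover t := rfl
    rw [List.pairwise_cons] at hpair
    have hdisj : Disjoint C (Finset.Icc cs ce) := by
      rw [Finset.disjoint_left]
      intro x hx hx'
      rw [Finset.mem_Icc] at hx'
      have := hC x hx; omega
    simp only [List.foldl_cons, mergeStep]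
    by_cases h1 : ce + 1 < s
    · rw [if_pos h1]
      rw [ih s e (total + (ce - cs + 1)) (C ∪ Finset.Icc cs ce) hpair.2
        (fun q hq => hpair.1 q hq)
        (fun q hq => hval q (List.mem_cons_of_mem _ hq))
        (le_of_lt hse)
        (by intro x hx
            rcases Finset.mem_union.1 hx with h | h
            · have := hC x h; omega
            · rw [Finset.mem_Icc] at h; omega)
        (card_union_Icc C cs ce total hdisj hcs htot)]
      congr 2
      rw [hcov, Finset.union_assoc]
    · rw [if_neg h1]
      have h1' : s ≤ ce + 1 := not_lt.1 h1
      by_cases h2 : ce < e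
      · rw [if_pos h2]
        rw [ih cs e total C hpair.2
          (fun q hq => le_trans hcs_s (hpair.1 q hq))
          (fun q hq => hval q (List.mem_cons_of_mem _ hq))
          (by omega) hC htot]
        congr 2
        apply Finset.ext; intro x
        by_cases hxC : x ∈ C
        · simp [hcov, hxC]
        · by_cases hxt : x ∈ cover t
          · simp [hcov, hxC, hxt]
          · simp only [hcov, Finset.mem_union, Finset.mem_Icc, hxC, hxt, or_false, false_or]
            omega
      · rw [if_neg h2]
        have h2' : e ≤ ce := not_lt.1 h2
        rw [ih cs ce total C hpair.2
          (fun q hq => le_trans hcs_s (hpair.1 q hq))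
          (fun q hq => hval q (List.mem_cons_of_mem _ hq))
          hcs hC htot]
        congr 2
        apply Finset.ext; intro x
        by_cases hxC : x ∈ C
        · simp [hcov, hxC]
        · by_cases hxt : x ∈ cover t
          · simp [hcov, hxC, hxt]
          · simp only [hcov, Finset.mem_union, Finset.mem_Icc, hxC, hxt, or_false, false_or]
            omega

theorem merge_top (l : List (Int × Int))
    (hpair : l.Pairwise (fun a b => a.1 ≤ b.1))
    (hval : ∀ p ∈ l, p.1 < p.2) :
    (match l.foldl mergeStep (none, 0) with
      | (none, s) => s
      | (some (a, b), s) => s + (b - a + 1)) = ((cover l).card : Int) := by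
  cases l with
  | nil => simp [cover]
  | cons p t =>
    obtain ⟨s, e⟩ := p
    rw [List.pairwise_cons] at hpair
    have hse : s < e := hval _ (List.mem_cons_self ..)
    simp only [List.foldl_cons, mergeStep]
    rw [merge_go t s e 0 ∅ hpair.2 (fun q hq => hpair.1 q hq)
      (fun q hq => hval q (List.mem_cons_of_mem _ hq)) (le_of_lt hse)
      (by simp) (by simp)]
    have h0 : (∅ : Finset Int) ∪ Finset.Icc s e ∪ cover t = cover ((s, e) :: t) := by
      rw [Finset.empty_union]; rfl
    rw [h0]

theorem sideB (trips : List (List Int)) :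
    days_represented_alt trips = ((cover (pairsOf trips)).card : Int) := by
  show (match (PySem.List.sorted (pairsOf trips) (fun p => p.1) false).foldl mergeStep (none, 0) with
      | (none, s) => s
      | (some (a, b), s) => s + (b - a + 1)) = _
  rw [merge_top _ (PySem.List.sorted_pairwise _ _)
    (by intro p hp
        rw [PySem.List.mem_sorted] at hp
        simp only [pairsOf, List.mem_map, List.mem_filter] at hp
        obtain ⟨t, ⟨_, hc⟩, rfl⟩ := hp
        simpa using hc)]
  have hset : cover (PySem.List.sorted (pairsOf trips) (fun p => p.1) false) = cover (pairsOf trips) := by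
    apply Finset.ext; intro x
    rw [mem_cover, mem_cover]
    constructor <;> rintro ⟨p, hp, h⟩
    · exact ⟨p, (PySem.List.mem_sorted _ _ _ _).1 hp, h⟩
    · exact ⟨p, (PySem.List.mem_sorted _ _ _ _).2 hp, h⟩
  rw [hset]

-- ===== VERDICT (by name: the statement is the Claim_ definition above) =====
theorem days_represented_spec : Claim_equal_days_represented := by
  intro trips _ _
  show days_represented trips = days_represented_alt trips
  rw [sideA, sideB]
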